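-- pv_equiv track=rewrite | github.com/g0yujin/CodingTest | 서연/1106/최소직사각형.py | solution
-- ===== SOURCE A (Python) =====
-- def solution(sizes):
--     answer = 0
--     a, b = 0, 0
--     for i, j in sizes:
--         if i >= j:
--             if i >= a:
--                 a = i
--
--             if j >= b:
--                 b = j
--         else:
--             if j >= a:
--                 a = j
--
--             if i >= b:
--                 b = i
--
--     answer = a*b
--
--     return answer
-- ===== SOURCE B (Python) =====
-- def solution(sizes):
--     # Normalize every card to (long side, short side); the 0x0 empty card is the
--     # base element of the reduction, then reduce by divide-and-conquer
--     # componentwise max and multiply the two components.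
--     cards = [(0, 0)] + [(max(i, j), min(i, j)) for i, j in sizes]
--
--     def merge(lo, hi):
--         if hi - lo == 1:
--             return cards[lo]
--         mid = (lo + hi) // 2
--         w1, h1 = merge(lo, mid)
--         w2, h2 = merge(mid, hi)
--         return (max(w1, w2), max(h1, h2))
--
--     w, h = merge(0, len(cards))
--     return w * h
-- ===== Notes on version B (the rewrite author's own statement) =====
-- stated objective: alternative
-- what changed: Replaces A's fused left-to-right accumulator loop with an i>=j branch by a normalization pass (each card becomes (long,short), plus the 0x0 base card) followed by a balanced divide-and-conquer reduction with componentwise max.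
import Mathlib
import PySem

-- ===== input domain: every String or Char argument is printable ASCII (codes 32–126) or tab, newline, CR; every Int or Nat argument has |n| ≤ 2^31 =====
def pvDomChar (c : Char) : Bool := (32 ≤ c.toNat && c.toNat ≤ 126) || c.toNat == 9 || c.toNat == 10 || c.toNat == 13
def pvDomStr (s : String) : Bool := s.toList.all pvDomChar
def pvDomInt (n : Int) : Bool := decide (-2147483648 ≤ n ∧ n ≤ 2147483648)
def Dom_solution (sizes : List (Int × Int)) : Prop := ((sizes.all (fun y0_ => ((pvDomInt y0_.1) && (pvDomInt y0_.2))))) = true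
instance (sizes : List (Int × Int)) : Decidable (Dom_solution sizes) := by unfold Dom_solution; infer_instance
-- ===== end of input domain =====

-- B replaces A's fused accumulator loop by a normalization pass ((long,short) per card, plus the 0×0 base card)
-- and a balanced divide-and-conquer componentwise-max reduction; objective: alternative (same cost, different traversal).

-- ===== PORT A =====
def solution (sizes : List (Int × Int)) : Int :=
  let p := sizes.foldl (fun (ab : Int × Int) (ij : Int × Int) =>
    let a := ab.1; let b := ab.2; let i := ij.1; let j := ij.2
    if i ≥ j then
      ((if i ≥ a then i else a), (if j ≥ b then j else b))
    else
      ((if j ≥ a then j else a), (if i ≥ b then i else b))) (0, 0)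
  p.1 * p.2

-- ===== PORT B =====
-- merge(lo, hi): the recursive helper of Source B. cards[lo] is ported with getD: solution_alt only
-- calls it with 1 ≤ hi - lo and hi ≤ cards.length, so the index is always in range;
-- the final 'else (0, 0)' is a totality guard for hi - lo = 0, unreachable from solution_alt.
def pvMerge (cards : List (Int × Int)) (lo hi : Nat) : Int × Int :=
  if hi - lo == 1 then cards.getD lo (0, 0)
  else if _h : lo + 2 ≤ hi then
    let mid := (lo + hi) / 2
    let p := pvMerge cards lo mid
    let q := pvMerge cards mid hi
    (max p.1 q.1, max p.2 q.2)
  else (0, 0)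
termination_by hi - lo
decreasing_by all_goals omega

def solution_alt (sizes : List (Int × Int)) : Int :=
  let cards := ((0 : Int), (0 : Int)) :: sizes.map (fun ij => (max ij.1 ij.2, min ij.1 ij.2))
  let wh := pvMerge cards 0 cards.length
  wh.1 * wh.2

-- ===== PRECONDITION & SPEC =====
def Spec_solution (sizes : List (Int × Int)) (out : Int) : Prop := out = solution_alt sizes
instance (sizes : List (Int × Int)) (out : Int) : Decidable (Spec_solution sizes out) := by unfold Spec_solution; infer_instance

-- ===== CLAIM (what is proved, stated in full; the proofs are below) =====
def Claim_equal_solution : Prop := ∀ (sizes : List (Int × Int)), Dom_solution sizes → Spec_solution sizes (solution sizes)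

-- ===== LEMMAS AND PROOFS =====

-- componentwise max, the combining operation of both programs
def pvCmax (p q : Int × Int) : Int × Int := (max p.1 q.1, max p.2 q.2)

lemma pvCmax_assoc (p q r : Int × Int) : pvCmax (pvCmax p q) r = pvCmax p (pvCmax q r) := by
  simp [pvCmax, max_assoc]

-- fold of a nonempty list with its head as the seed
def pvSegMax : List (Int × Int) → Int × Int
  | [] => (0, 0)
  | x :: xs => xs.foldl pvCmax x

lemma foldl_cmax_shift (ys : List (Int × Int)) (a y : Int × Int) :
    ys.foldl pvCmax (pvCmax a y) = pvCmax a (ys.foldl pvCmax y) := by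
  induction ys generalizing a y with
  | nil => rfl
  | cons z zs ih => simp only [List.foldl_cons, pvCmax_assoc]; exact ih a (pvCmax y z)

lemma segMax_append (l1 l2 : List (Int × Int)) (h1 : l1 ≠ []) (h2 : l2 ≠ []) :
    pvSegMax (l1 ++ l2) = pvCmax (pvSegMax l1) (pvSegMax l2) := by
  match l1, l2 with
  | x :: xs, y :: ys =>
    simp only [pvSegMax, List.cons_append, List.foldl_append, List.foldl_cons]
    rw [foldl_cmax_shift]

-- the segment cards[lo:hi] as Source B's recursion sees it
def pvSeg (cards : List (Int × Int)) (lo hi : Nat) : List (Int × Int) :=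
  (List.range' lo (hi - lo)).map (fun k => cards.getD k (0, 0))

lemma pvSeg_ne_nil (cards : List (Int × Int)) (lo hi : Nat) (h : lo < hi) :
    pvSeg cards lo hi ≠ [] := by
  simp [pvSeg, List.range'_eq_nil_iff]; omega

lemma pvSeg_split (cards : List (Int × Int)) (lo mid hi : Nat) (h1 : lo ≤ mid) (h2 : mid ≤ hi) :
    pvSeg cards lo hi = pvSeg cards lo mid ++ pvSeg cards mid hi := by
  unfold pvSeg
  rw [← List.map_append]
  congr 1
  have : hi - lo = (mid - lo) + (hi - mid) := by omega
  have h3 : lo + (mid - lo) = mid := by omega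
  rw [this, ← List.range'_append_1, h3]

lemma pvMerge_eq_segMax (cards : List (Int × Int)) :
    ∀ n lo hi, hi - lo = n → lo < hi →
      pvMerge cards lo hi = pvSegMax (pvSeg cards lo hi) := by
  intro n
  induction n using Nat.strong_induction_on with
  | _ n ih =>
    intro lo hi hn hlt
    rw [pvMerge]
    by_cases h1 : hi - lo = 1
    · simp only [h1, beq_self_eq_true, if_true]
      have : pvSeg cards lo hi = [cards.getD lo (0, 0)] := by
        unfold pvSeg; rw [h1]; simp
      rw [this]; rfl
    · have h2 : lo + 2 ≤ hi := by omega
      simp only [show ((hi - lo == 1) = false) by simp [h1], Bool.false_eq_true, if_false,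
        dif_pos h2]
      have hmid1 : lo < (lo + hi) / 2 := by omega
      have hmid2 : (lo + hi) / 2 < hi := by omega
      rw [ih ((lo + hi) / 2 - lo) (by omega) lo ((lo + hi) / 2) rfl hmid1,
          ih (hi - (lo + hi) / 2) (by omega) ((lo + hi) / 2) hi rfl hmid2]
      rw [pvSeg_split cards lo ((lo + hi) / 2) hi (by omega) (by omega),
          segMax_append _ _ (pvSeg_ne_nil _ _ _ hmid1) (pvSeg_ne_nil _ _ _ hmid2)]
      rfl

lemma pvSeg_full (cards : List (Int × Int)) :
    pvSeg cards 0 cards.length = cards := by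
  apply List.ext_getElem
  · simp [pvSeg]
  · intro i h1 h2
    simp [pvSeg, List.getD_eq_getElem?_getD, List.getElem?_eq_getElem h2]

-- A's loop step is pvCmax with the card normalized to (long, short)
lemma step_eq (ab ij : Int × Int) :
    (let a := ab.1; let b := ab.2; let i := ij.1; let j := ij.2
     if i ≥ j then
       ((if i ≥ a then i else a), (if j ≥ b then j else b))
     else
       ((if j ≥ a then j else a), (if i ≥ b then i else b)))
    = pvCmax ab (max ij.1 ij.2, min ij.1 ij.2) := by
  dsimp only [pvCmax]
  split_ifs <;> refine Prod.ext ?_ ?_ <;> simp only [max_def, min_def] <;> split_ifs <;> omega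

lemma segMax_cons_zero (m : List (Int × Int)) :
    pvSegMax ((0, 0) :: m) = m.foldl pvCmax (0, 0) := rfl

-- A's whole fold, rewritten step by step via step_eq
lemma foldA_eq (l : List (Int × Int)) (ab : Int × Int) :
    l.foldl (fun (ab : Int × Int) (ij : Int × Int) =>
      let a := ab.1; let b := ab.2; let i := ij.1; let j := ij.2
      if i ≥ j then
        ((if i ≥ a then i else a), (if j ≥ b then j else b))
      else
        ((if j ≥ a then j else a), (if i ≥ b then i else b))) ab
    = l.foldl (fun x y => pvCmax x (max y.1 y.2, min y.1 y.2)) ab := by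
  induction l generalizing ab with
  | nil => rfl
  | cons x xs ih => simp only [List.foldl_cons]; rw [step_eq]; exact ih _

-- ===== VERDICT (by name: the statement is the Claim_ definition above) =====
theorem solution_spec : Claim_equal_solution := by
  intro sizes _
  unfold Spec_solution solution solution_alt
  dsimp only
  rw [pvMerge_eq_segMax _ _ 0 _ rfl (by simp), pvSeg_full, segMax_cons_zero,
      List.foldl_map, foldA_eq]
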